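-- pv_equiv track=rewrite | github.com/keremidarski/python_playground | Programming 0/week 4/08_prime_pair.py | count_zero_pairs
-- ===== SOURCE A (Python) =====
-- def is_prime(n):
--     start = 2
--     is_prime = True
--
--     if n > 2:
--         while start < n:
--             if n % start == 0:
--                 is_prime = False
--                 break
--
--             start += 1
--     else:
--         is_prime = False
--
--     return is_prime
--
-- def count_zero_pairs(numbers):
--     count = 0
--     prime = False
--     n = len(numbers)
--
--     for x_index in range(0, n):
--         for y_index in range(x_index, n):
--             x = numbers[x_index]
--             y = numbers[y_index]
--
--             prime_number = x + y
--
--             if is_prime(prime_number):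
--                 count += 1
--
--     if count != 0:
--         prime = True
--
--     return prime
-- ===== SOURCE B (Python) =====
-- def _is_odd_prime(s):
--     # s > 2: primality by trial division over odd divisors up to sqrt(s)
--     if s % 2 == 0:
--         return False
--     d = 3
--     while d * d <= s:
--         if s % d == 0:
--             return False
--         d += 2
--     return True
--
-- def count_zero_pairs(numbers):
--     sums = set()
--     n = len(numbers)
--     for i in range(n):
--         for j in range(i, n):
--             s = numbers[i] + numbers[j]
--             if s > 2:
--                 sums.add(s)
--     return any(_is_odd_prime(s) for s in sums)
-- ===== Notes on version B (the rewrite author's own statement) =====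
-- stated objective: faster
-- what changed: B collects the distinct pair sums greater than 2 into a set in one nested pass and then tests each distinct sum once for primality by trial division over odd divisors up to sqrt(s), instead of A's per-pair trial division scanning every candidate divisor up to the sum itself.
import Mathlib
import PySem

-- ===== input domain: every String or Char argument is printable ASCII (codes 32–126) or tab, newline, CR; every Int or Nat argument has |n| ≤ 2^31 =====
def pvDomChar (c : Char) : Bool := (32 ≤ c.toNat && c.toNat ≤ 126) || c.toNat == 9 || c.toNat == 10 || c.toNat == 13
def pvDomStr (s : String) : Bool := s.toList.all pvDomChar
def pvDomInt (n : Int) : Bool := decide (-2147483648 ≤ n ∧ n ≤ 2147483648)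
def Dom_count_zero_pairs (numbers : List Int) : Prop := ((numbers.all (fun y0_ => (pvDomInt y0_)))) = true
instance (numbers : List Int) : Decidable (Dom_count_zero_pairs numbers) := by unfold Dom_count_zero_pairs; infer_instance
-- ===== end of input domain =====

-- B replaces A's per-pair trial division up to the sum by a one-pass collection of the
-- DISTINCT pair sums > 2, each tested once by trial division over odd divisors up to √s
-- (objective: faster — each candidate costs O(√s) instead of O(s), and duplicates are tested once).

-- ===== PORT A =====
-- while start < n: if n % start == 0: break-false; start += 1
def isPrimeALoop (n start : Int) : Bool :=
  if _h : start < n then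
    if PySem.Int.mod n start == 0 then false
    else isPrimeALoop n (start + 1)
  else true
termination_by (n - start).toNat
decreasing_by omega

def isPrimeA (n : Int) : Bool :=
  if n > 2 then isPrimeALoop n 2 else false

def count_zero_pairs (numbers : List Int) : Bool :=
  let n : Int := (numbers.length : Int)
  let count : Int :=
    (PySem.List.pyRange 0 n 1).foldl (fun c xi =>
      (PySem.List.pyRange xi n 1).foldl (fun c yi =>
        let x := PySem.List.pyGetD numbers xi 0
        let y := PySem.List.pyGetD numbers yi 0
        if isPrimeA (x + y) then c + 1 else c) c) 0
  count != 0

-- ===== PORT B =====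
-- while d * d <= s: if s % d == 0: return False; d += 2
def isOddPrimeBLoop (s d : Int) : Bool :=
  if _h : d * d ≤ s then
    if PySem.Int.mod s d == 0 then false
    else isOddPrimeBLoop s (d + 2)
  else true
termination_by (s + 2 - d).toNat
decreasing_by
  have hd : d ≤ d * d := by nlinarith [sq_nonneg (d - 1), sq_nonneg d]
  have hds : d ≤ s := le_trans hd _h
  omega

def isOddPrimeB (s : Int) : Bool :=
  if PySem.Int.mod s 2 == 0 then false
  else isOddPrimeBLoop s 3

def count_zero_pairs_alt (numbers : List Int) : Bool :=
  let n : Int := (numbers.length : Int)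
  let sums : PySem.Set Int :=
    (PySem.List.pyRange 0 n 1).foldl (fun st i =>
      (PySem.List.pyRange i n 1).foldl (fun st j =>
        let s := PySem.List.pyGetD numbers i 0 + PySem.List.pyGetD numbers j 0
        if s > 2 then PySem.Set.add st s else st) st) PySem.Set.empty
  sums.any isOddPrimeB

-- ===== PRECONDITION & SPEC =====
def Spec_count_zero_pairs (numbers : List Int) (out : Bool) : Prop := out = count_zero_pairs_alt numbers
instance (numbers : List Int) (out : Bool) : Decidable (Spec_count_zero_pairs numbers out) := by unfold Spec_count_zero_pairs; infer_instance

-- ===== CLAIM (what is proved, stated in full; the proofs are below) =====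
def Claim_equal_count_zero_pairs : Prop := ∀ (numbers : List Int), Dom_count_zero_pairs numbers → Spec_count_zero_pairs numbers (count_zero_pairs numbers)

-- ===== LEMMAS AND PROOFS =====

-- "no nontrivial divisor below s": the predicate both primality tests decide for s > 2
def NoDivI (s : Int) : Prop := ∀ d : Int, 2 ≤ d → d < s → ¬ d ∣ s

theorem isPrimeALoop_iff (n start : Int) :
    isPrimeALoop n start = true ↔ ∀ d, start ≤ d → d < n → ¬ ((d : Int) ∣ n) := by
  induction start using isPrimeALoop.induct (n := n) with
  | case1 start h hmod =>
    rw [isPrimeALoop]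
    simp only [dif_pos h, if_pos hmod]
    simp only [beq_iff_eq, PySem.Int.mod_eq_zero_iff_dvd] at hmod
    simp only [Bool.false_eq_true, false_iff]
    push_neg
    exact ⟨start, le_refl _, h, hmod⟩
  | case2 start h hmod ih =>
    rw [isPrimeALoop]
    simp only [dif_pos h, if_neg hmod, ih]
    simp only [beq_iff_eq, PySem.Int.mod_eq_zero_iff_dvd] at hmod
    constructor
    · intro H d hd1 hd2
      rcases eq_or_lt_of_le hd1 with rfl | hlt
      · exact fun hdvd => hmod hdvd
      · exact H d (by omega) hd2
    · intro H d hd1 hd2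
      exact H d (by omega) hd2
  | case3 start h =>
    rw [isPrimeALoop]
    simp only [dif_neg h, true_iff]
    intro d hd1 hd2
    omega

theorem isOddPrimeBLoop_iff (s : Int) (d : Int) (hd : 0 < d) :
    isOddPrimeBLoop s d = true ↔
      ∀ k : ℕ, (d + 2 * k) * (d + 2 * k) ≤ s → ¬ ((d + 2 * (k : Int)) ∣ s) := by
  induction d using isOddPrimeBLoop.induct (s := s) with
  | case1 d h hmod =>
    rw [isOddPrimeBLoop]
    simp only [dif_pos h, if_pos hmod]
    simp only [beq_iff_eq, PySem.Int.mod_eq_zero_iff_dvd] at hmod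
    simp only [Bool.false_eq_true, false_iff]
    push_neg
    exact ⟨0, by simpa using h, by simpa using hmod⟩
  | case2 d h hmod ih =>
    rw [isOddPrimeBLoop]
    simp only [dif_pos h, if_neg hmod]
    simp only [beq_iff_eq, PySem.Int.mod_eq_zero_iff_dvd] at hmod
    rw [ih (by omega)]
    constructor
    · intro H k hk
      cases k with
      | zero => simpa using hmod
      | succ k' =>
        have e : d + 2 * ((k' : Int) + 1) = (d + 2) + 2 * (k' : Int) := by ring
        have hk' : (d + 2 + 2 * (k' : ℕ)) * (d + 2 + 2 * (k' : ℕ)) ≤ s := by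
          push_cast at hk ⊢; nlinarith [hk]
        have := H k' hk'
        push_cast at this ⊢
        rw [e]; push_cast; exact this
    · intro H k hk
      have e2 : (d + 2) + 2 * (k : Int) = d + 2 * ((k : ℕ) + 1 : ℕ) := by push_cast; ring
      have hk2 : (d + 2 * ((k : ℕ) + 1 : ℕ)) * (d + 2 * ((k : ℕ) + 1 : ℕ)) ≤ s := by
        push_cast at hk ⊢; nlinarith [hk]
      have := H ((k : ℕ) + 1) hk2
      rw [e2]; exact this
  | case3 d h =>
    rw [isOddPrimeBLoop]
    simp only [dif_neg h, true_iff]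
    intro k hk
    intro _
    have h1 : d ≤ d + 2 * (k : Int) := by omega
    have h0 : (0:Int) ≤ d := by omega
    nlinarith [hk]

theorem isOddPrimeB_iff (s : Int) (hs : 2 < s) :
    isOddPrimeB s = true ↔ NoDivI s := by
  unfold isOddPrimeB
  split
  · rename_i heven
    simp only [beq_iff_eq, PySem.Int.mod_eq_zero_iff_dvd] at heven
    simp only [Bool.false_eq_true, false_iff]
    intro H
    exact H 2 le_rfl hs heven
  · rename_i hodd
    simp only [beq_iff_eq, PySem.Int.mod_eq_zero_iff_dvd] at hodd
    rw [isOddPrimeBLoop_iff s 3 (by omega)]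
    constructor
    · intro H d hd2 hds hdvd
      obtain ⟨e, he⟩ := hdvd
      have he0 : 0 < e := by nlinarith
      have hne : e ≠ 1 := by
        intro h1
        rw [h1, mul_one] at he
        omega
      have he2 : 2 ≤ e := by omega
      have key : ∃ f : Int, 2 ≤ f ∧ f * f ≤ s ∧ f ∣ s := by
        rcases le_total d e with hle | hle
        · exact ⟨d, hd2, by nlinarith, ⟨e, he⟩⟩
        · exact ⟨e, he2, by nlinarith, ⟨d, by rw [he]; ring⟩⟩
      obtain ⟨f, hf2, hfs, hfd⟩ := key
      rcases Int.even_or_odd f with hev | hodd2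
      · obtain ⟨m, hm⟩ := hev
        exact hodd (dvd_trans ⟨m, by omega⟩ hfd)
      · obtain ⟨m, hm⟩ := hodd2
        apply H (m - 1).toNat
        · have h3 : (3 : Int) + 2 * (((m - 1).toNat : ℕ) : Int) = f := by omega
          push_cast at h3 ⊢
          rw [h3]
          exact hfs
        · have h3 : (3 : Int) + 2 * (((m - 1).toNat : ℕ) : Int) = f := by omega
          rw [h3]
          exact hfd
    · intro H k hk hdvd
      have hlt : 3 + 2 * (k : Int) < s := by nlinarith [hk]
      exact H _ (by omega) hlt hdvd

theorem isPrimeA_iff (s : Int) :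
    isPrimeA s = true ↔ 2 < s ∧ NoDivI s := by
  unfold isPrimeA
  split
  · rename_i h
    rw [isPrimeALoop_iff]
    unfold NoDivI
    exact ⟨fun H => ⟨h, H⟩, fun H => H.2⟩
  · rename_i h
    simp only [Bool.false_eq_true, false_iff]
    intro H
    exact h H.1

-- a nested pair loop is a single loop over the flattened list of pair values
theorem nested_pairs {β : Type} (l : List Int) (r : Int → List Int) (h : Int → Int → Int)
    (f : β → Int → β) (init : β) :
    l.foldl (fun acc i => (r i).foldl (fun acc j => f acc (h i j)) acc) init
      = (l.flatMap (fun i => (r i).map (h i))).foldl f init := by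
  induction l generalizing init with
  | nil => rfl
  | cons a t ih => simp [List.foldl_append, List.foldl_map, ih]

-- membership in the set built by "if s > 2: sums.add(s)"
theorem mem_sums (l : List Int) (st : PySem.Set Int) (x : Int) :
    x ∈ l.foldl (fun st s => if s > 2 then PySem.Set.add st s else st) st ↔
      x ∈ st ∨ (x ∈ l ∧ 2 < x) := by
  induction l generalizing st with
  | nil => simp
  | cons a t ih =>
    simp only [List.foldl_cons, ih]
    split
    · rename_i ha
      rw [PySem.Set.mem_add]
      constructor
      · rintro ((h | rfl) | h)
        · exact Or.inl h
        · exact Or.inr ⟨List.mem_cons_self, ha⟩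
        · exact Or.inr ⟨List.mem_cons_of_mem _ h.1, h.2⟩
      · rintro (h | ⟨hm, hx⟩)
        · exact Or.inl (Or.inl h)
        · rcases List.mem_cons.mp hm with rfl | hm2
          · exact Or.inl (Or.inr rfl)
          · exact Or.inr ⟨hm2, hx⟩
    · rename_i ha
      constructor
      · rintro (h | h)
        · exact Or.inl h
        · exact Or.inr ⟨List.mem_cons_of_mem _ h.1, h.2⟩
      · rintro (h | ⟨hm, hx⟩)
        · exact Or.inl h
        · rcases List.mem_cons.mp hm with rfl | hm2
          · omega
          · exact Or.inr ⟨hm2, hx⟩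

-- ===== VERDICT (by name: the statement is the Claim_ definition above) =====
theorem count_zero_pairs_spec : Claim_equal_count_zero_pairs := by
  intro numbers _dom
  unfold Spec_count_zero_pairs count_zero_pairs count_zero_pairs_alt
  simp only []
  rw [nested_pairs (f := fun c s => if isPrimeA s then c + 1 else c)
        (h := fun i j => PySem.List.pyGetD numbers i 0 + PySem.List.pyGetD numbers j 0)]
  rw [nested_pairs (f := fun st s => if s > 2 then PySem.Set.add st s else st)
        (h := fun i j => PySem.List.pyGetD numbers i 0 + PySem.List.pyGetD numbers j 0)]
  rw [PySem.List.foldl_if_add_one]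
  rw [Bool.eq_iff_iff]
  rw [bne_iff_ne, List.any_eq_true]
  set P := ((PySem.List.pyRange 0 (numbers.length : Int) 1).flatMap fun i =>
    (PySem.List.pyRange i (numbers.length : Int) 1).map fun j =>
      PySem.List.pyGetD numbers i 0 + PySem.List.pyGetD numbers j 0) with hP
  constructor
  · intro hne
    have hc : P.countP (fun s => isPrimeA s) ≠ 0 := by
      intro h0
      rw [h0] at hne
      simp at hne
    obtain ⟨x, hxm, hxp⟩ := List.countP_pos_iff.mp (Nat.pos_of_ne_zero hc)
    have h2 := (isPrimeA_iff x).mp (by simpa using hxp)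
    refine ⟨x, ?_, ?_⟩
    · rw [mem_sums]
      exact Or.inr ⟨hxm, h2.1⟩
    · exact (isOddPrimeB_iff x h2.1).mpr h2.2
  · rintro ⟨x, hxm, hxp⟩
    rw [mem_sums] at hxm
    rcases hxm with h | ⟨hxm, hx2⟩
    · simp [PySem.Set.empty] at h
    · have hA : isPrimeA x = true := (isPrimeA_iff x).mpr ⟨hx2, (isOddPrimeB_iff x hx2).mp hxp⟩
      have hpos : 0 < P.countP (fun s => isPrimeA s) :=
        List.countP_pos_iff.mpr ⟨x, hxm, by simpa using hA⟩
      intro h0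
      rw [zero_add] at h0
      have hz : P.countP (fun s => isPrimeA s) = 0 := Int.natCast_eq_zero.mp h0
      omega
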